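-- pv_equiv track=rewrite | github.com/pypi-data/pypi-mirror-404 | packages/mccoygroup-mcutils/mccoygroup_mcutils-1.6.0.tar.gz/mccoygroup_mcutils-1.6.0/McUtils/Coordinerds/Generators.py | get_stretch_angle_dihedrals
-- ===== SOURCE A (Python) =====
-- def get_stretch_angle_dihedrals(stretches, angles):
--     dihedrals = []
--     for sa,sb in stretches:
--         for ba,bc,bd in angles:
--             if sa in (ba,bc,bd) and sb in (ba,bc,bd): continue
--             # enumerate for simplicity & avoiding try/except
--             if sa == ba:
--                 dihedrals.append(
--                     (sb, ba, bc, bd)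
--                 )
--             elif sa == bc:
--                 dihedrals.append(
--                     (ba, sb, bc, bd)
--                 )
--             elif sa == bd:
--                 dihedrals.append(
--                     (ba, bc, bd, sb)
--                 )
--             elif sb == ba:
--                 dihedrals.append(
--                     (sa, ba, bc, bd)
--                 )
--             elif sb == bc:
--                 dihedrals.append(
--                     (ba, sa, bc, bd)
--                 )
--             elif sb == bd:
--                 dihedrals.append(
--                     (ba, bc, bd, sa)
--                 )
--     return dihedrals
-- ===== SOURCE B (Python) =====
-- def _entry(sa, sb, ba, bc, bd):
--     if sa == ba: return (sb, ba, bc, bd)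
--     if sa == bc: return (ba, sb, bc, bd)
--     if sa == bd: return (ba, bc, bd, sb)
--     if sb == ba: return (sa, ba, bc, bd)
--     if sb == bc: return (ba, sa, bc, bd)
--     if sb == bd: return (ba, bc, bd, sa)
--     return None
--
-- def get_stretch_angle_dihedrals(stretches, angles):
--     # Index angle positions by atom value once; each stretch then visits only
--     # the angles containing one of its atoms, merging the two increasing index
--     # lists so the original angle order is kept.
--     index = {}
--     for i, (ba, bc, bd) in enumerate(angles):
--         for v in dict.fromkeys((ba, bc, bd)):
--             index[v] = index.get(v, []) + [i]
--     dihedrals = []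
--     for sa, sb in stretches:
--         la = index.get(sa, [])
--         lb = index.get(sb, [])
--         ia = 0
--         ib = 0
--         while ia < len(la) or ib < len(lb):
--             if ib >= len(lb) or (ia < len(la) and la[ia] <= lb[ib]):
--                 i = la[ia]; ia += 1
--             else:
--                 i = lb[ib]; ib += 1
--             ba, bc, bd = angles[i]
--             if sa in (ba, bc, bd) and sb in (ba, bc, bd):
--                 continue
--             e = _entry(sa, sb, ba, bc, bd)
--             if e is not None:
--                 dihedrals.append(e)
--     return dihedrals
-- ===== Notes on version B (the rewrite author's own statement) =====
-- stated objective: faster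
-- what changed: Replaces A's full scan of all angles per stretch with a dict indexing angle positions by atom value, built once; each stretch then only visits the merged (order-preserving) index lists of its two atoms.
import Mathlib
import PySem

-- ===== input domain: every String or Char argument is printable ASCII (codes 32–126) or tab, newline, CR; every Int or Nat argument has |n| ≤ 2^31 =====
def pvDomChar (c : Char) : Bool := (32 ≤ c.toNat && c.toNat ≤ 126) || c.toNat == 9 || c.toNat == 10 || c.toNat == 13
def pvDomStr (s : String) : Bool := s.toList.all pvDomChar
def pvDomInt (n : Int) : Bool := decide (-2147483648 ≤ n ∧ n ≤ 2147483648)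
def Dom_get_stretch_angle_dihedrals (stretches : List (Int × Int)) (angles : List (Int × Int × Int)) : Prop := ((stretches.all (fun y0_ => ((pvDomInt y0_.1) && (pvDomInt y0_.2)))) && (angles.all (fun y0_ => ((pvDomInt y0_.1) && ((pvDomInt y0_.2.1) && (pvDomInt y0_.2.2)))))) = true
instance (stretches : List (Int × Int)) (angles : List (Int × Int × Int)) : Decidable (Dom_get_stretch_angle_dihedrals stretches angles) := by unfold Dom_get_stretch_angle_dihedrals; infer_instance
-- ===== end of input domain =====

-- B replaces A's per-stretch scan of all angles by a positions-by-atom index built once;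
-- same return value, proved equal below.

-- ===== PORT A =====
-- literal transliteration of A: for every stretch, scan ALL angles; the if/elif
-- chain appends at most one dihedral per (stretch, angle) pair.
def get_stretch_angle_dihedrals (stretches : List (Int × Int)) (angles : List (Int × Int × Int)) : List (Int × Int × Int × Int) :=
  stretches.foldl (fun dihedrals s =>
    angles.foldl (fun dihedrals t =>
      let sa := s.1; let sb := s.2
      let ba := t.1; let bc := t.2.1; let bd := t.2.2
      if (sa = ba ∨ sa = bc ∨ sa = bd) ∧ (sb = ba ∨ sb = bc ∨ sb = bd) then dihedrals
      else if sa = ba then dihedrals ++ [(sb, ba, bc, bd)]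
      else if sa = bc then dihedrals ++ [(ba, sb, bc, bd)]
      else if sa = bd then dihedrals ++ [(ba, bc, bd, sb)]
      else if sb = ba then dihedrals ++ [(sa, ba, bc, bd)]
      else if sb = bc then dihedrals ++ [(ba, sa, bc, bd)]
      else if sb = bd then dihedrals ++ [(ba, bc, bd, sa)]
      else dihedrals) dihedrals) []

-- ===== PORT B =====
-- B indexes angle positions by atom value once, then per stretch merges the two
-- increasing index lists and visits only those angles.  Faster when few angles
-- share atoms with each stretch; output identical to A (proved below).

-- Source B's _entry helper: the if/elif chain returning the dihedral or None
def pvEntry? (sa sb ba bc bd : Int) : Option (Int × Int × Int × Int) :=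
  if sa = ba then some (sb, ba, bc, bd)
  else if sa = bc then some (ba, sb, bc, bd)
  else if sa = bd then some (ba, bc, bd, sb)
  else if sb = ba then some (sa, ba, bc, bd)
  else if sb = bc then some (ba, sa, bc, bd)
  else if sb = bd then some (ba, bc, bd, sa)
  else none

-- Source B's two-cursor while loop merging the increasing index lists (ties take
-- the left list first), written as recursion on the two remaining suffixes
def pvMerge : List Int → List Int → List Int
  | [], lb => lb
  | a :: la, [] => a :: la
  | a :: la, b :: lb => if a ≤ b then a :: pvMerge la (b :: lb) else b :: pvMerge (a :: la) lb
termination_by la lb => la.length + lb.length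

-- Source B's index-building loop: index[v] = index.get(v, []) + [i] for each distinct atom v of angle i
def pvIndex (angles : List (Int × Int × Int)) : PySem.Dict Int (List Int) :=
  (PySem.List.enumerate angles 0).foldl (fun d p =>
    (PySem.List.dedup [p.2.1, p.2.2.1, p.2.2.2]).foldl (fun d v => d.modify v [] (· ++ [p.1])) d)
    PySem.Dict.empty

def get_stretch_angle_dihedrals_alt (stretches : List (Int × Int)) (angles : List (Int × Int × Int)) : List (Int × Int × Int × Int) :=
  let index := pvIndex angles
  stretches.foldl (fun dihedrals s =>
    let la := index.getD s.1 []
    let lb := index.getD s.2 []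
    (pvMerge la lb).foldl (fun dihedrals i =>
      -- angles[i]; every merged index is a valid position, so the default is never read
      let t := PySem.List.pyGetD angles i (0, 0, 0)
      if (s.1 = t.1 ∨ s.1 = t.2.1 ∨ s.1 = t.2.2) ∧ (s.2 = t.1 ∨ s.2 = t.2.1 ∨ s.2 = t.2.2) then dihedrals
      else match pvEntry? s.1 s.2 t.1 t.2.1 t.2.2 with
        | some e => dihedrals ++ [e]
        | none => dihedrals) dihedrals) []

-- ===== PRECONDITION & SPEC =====
def Spec_get_stretch_angle_dihedrals (stretches : List (Int × Int)) (angles : List (Int × Int × Int)) (out : List (Int × Int × Int × Int)) : Prop := out = get_stretch_angle_dihedrals_alt stretches angles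
instance (stretches : List (Int × Int)) (angles : List (Int × Int × Int)) (out : List (Int × Int × Int × Int)) : Decidable (Spec_get_stretch_angle_dihedrals stretches angles out) := by unfold Spec_get_stretch_angle_dihedrals; infer_instance

-- ===== CLAIM (what is proved, stated in full; the proofs are below) =====
def Claim_equal_get_stretch_angle_dihedrals : Prop := ∀ (stretches : List (Int × Int)) (angles : List (Int × Int × Int)), Dom_get_stretch_angle_dihedrals stretches angles → Spec_get_stretch_angle_dihedrals stretches angles (get_stretch_angle_dihedrals stretches angles)

-- ===== LEMMAS AND PROOFS =====

-- the three atoms of an angle, and the positions in `angles` whose angle contains v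
def pvTri (t : Int × Int × Int) : List Int := [t.1, t.2.1, t.2.2]

def pvOcc (angles : List (Int × Int × Int)) (v : Int) : List Int :=
  (PySem.List.enumerate angles 0).flatMap (fun p => if v ∈ pvTri p.2 then [p.1] else [])

-- per-angle list A emits for a stretch (sa, sb)
def pvEmit (sa sb : Int) (t : Int × Int × Int) : List (Int × Int × Int × Int) :=
  if (sa = t.1 ∨ sa = t.2.1 ∨ sa = t.2.2) ∧ (sb = t.1 ∨ sb = t.2.1 ∨ sb = t.2.2) then []
  else (pvEntry? sa sb t.1 t.2.1 t.2.2).toList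

theorem pv_filter_nodup_eq {α} [DecidableEq α] (l : List α) (v : α) (h : l.Nodup) :
    l.filter (fun x => x == v) = if v ∈ l then [v] else [] := by
  induction l with
  | nil => simp
  | cons a l ih =>
    rcases List.nodup_cons.mp h with ⟨ha, hl⟩
    by_cases hav : a = v
    · subst hav
      rw [List.filter_cons_of_pos (by simp)]
      have he : l.filter (fun x => x == a) = [] :=
        List.filter_eq_nil_iff.mpr (fun x hx hxa => ha (by simpa using (beq_iff_eq.mp hxa) ▸ hx))
      simp [he]
    · have hva : ¬ v = a := fun hv => hav hv.symm
      rw [List.filter_cons_of_neg (by simp [hav]), ih hl]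
      simp [List.mem_cons, hva]

-- the index dict looks up exactly the occurrence list
theorem pv_index_getD (angles : List (Int × Int × Int)) (v : Int) :
    (pvIndex angles).getD v [] = pvOcc angles v := by
  unfold pvIndex pvOcc
  rw [show (PySem.List.enumerate angles 0).foldl (fun d p =>
      (PySem.List.dedup [p.2.1, p.2.2.1, p.2.2.2]).foldl (fun d v => d.modify v [] (· ++ [p.1])) d)
      PySem.Dict.empty
      = ((PySem.List.enumerate angles 0).flatMap
          (fun p => (PySem.List.dedup [p.2.1, p.2.2.1, p.2.2.2]).map (fun w => (w, p.1)))).foldl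
          (fun d q => d.modify q.1 [] (· ++ [q.2])) PySem.Dict.empty from by
    rw [List.foldl_flatMap]; simp only [List.foldl_map]]
  rw [PySem.Dict.getD_foldl_modify_append, PySem.Dict.getD_empty, List.nil_append,
    List.filter_flatMap, List.map_flatMap]
  refine List.flatMap_congr (fun p _ => ?_)
  rw [List.filter_map, List.map_map]
  have hcomp : (fun q : Int × Int => q.1 == v) ∘ (fun w => (w, p.1)) = fun w => w == v := rfl
  rw [hcomp, pv_filter_nodup_eq _ _ (PySem.List.nodup_dedup _)]
  have hd : v ∈ PySem.List.dedup [p.2.1, p.2.2.1, p.2.2.2] ↔ v ∈ pvTri p.2 :=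
    PySem.List.mem_dedup _ _
  by_cases hv : v ∈ pvTri p.2
  · rw [if_pos (hd.mpr hv), if_pos hv]; rfl
  · rw [if_neg (fun h => hv (hd.mp h)), if_neg hv]; rfl

theorem pvMerge_cons_left {a : Int} (la lb : List Int) (h : ∀ b ∈ lb, a < b) :
    pvMerge (a :: la) lb = a :: pvMerge la lb := by
  cases lb with
  | nil => cases la <;> simp [pvMerge]
  | cons b lb => have := h b (by simp); simp [pvMerge, le_of_lt this]

theorem pvMerge_cons_right {a : Int} (la lb : List Int) (h : ∀ x ∈ la, a < x) :
    pvMerge la (a :: lb) = a :: pvMerge la lb := by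
  cases la with
  | nil => simp [pvMerge]
  | cons x la =>
    have := h x (by simp)
    have hxa : ¬ x ≤ a := not_le.mpr this
    simp [pvMerge, hxa]

theorem pv_mem_flatMap_if {β} (l : List (Int × β)) (P : Int × β → Prop) [DecidablePred P]
    {x : Int} (hx : x ∈ l.flatMap (fun p => if P p then [p.1] else [])) :
    ∃ p ∈ l, x = p.1 := by
  rcases List.mem_flatMap.mp hx with ⟨p, hp, hmem⟩
  refine ⟨p, hp, ?_⟩
  by_cases h : P p <;> simp [h] at hmem
  exact hmem

-- merging the two occurrence streams interleaves them in position order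
theorem pv_merge_flatMap {β} (l : List (Int × β)) (hl : l.Pairwise (fun p q => p.1 < q.1))
    (P Q : Int × β → Prop) [DecidablePred P] [DecidablePred Q] :
    pvMerge (l.flatMap fun p => if P p then [p.1] else []) (l.flatMap fun p => if Q p then [p.1] else [])
      = l.flatMap fun p => (if P p then [p.1] else []) ++ (if Q p then [p.1] else []) := by
  induction l with
  | nil => simp [pvMerge]
  | cons p l ih =>
    rcases List.pairwise_cons.mp hl with ⟨hp, hl'⟩
    have hA : ∀ x ∈ l.flatMap (fun q => if P q then [q.1] else []), p.1 < x := by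
      intro x hx; rcases pv_mem_flatMap_if l P hx with ⟨q, hq, rfl⟩; exact hp q hq
    have hB : ∀ x ∈ l.flatMap (fun q => if Q q then [q.1] else []), p.1 < x := by
      intro x hx; rcases pv_mem_flatMap_if l Q hx with ⟨q, hq, rfl⟩; exact hp q hq
    by_cases hP : P p <;> by_cases hQ : Q p
    · simp only [List.flatMap_cons, if_pos hP, if_pos hQ,
        List.cons_append, List.nil_append]
      have e1 : pvMerge (p.1 :: l.flatMap fun q => if P q then [q.1] else [])
          (p.1 :: l.flatMap fun q => if Q q then [q.1] else [])
          = p.1 :: pvMerge (l.flatMap fun q => if P q then [q.1] else [])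
              (p.1 :: l.flatMap fun q => if Q q then [q.1] else []) := by
        simp [pvMerge]
      rw [e1, pvMerge_cons_right _ _ hA, ih hl']
    · simp only [List.flatMap_cons, if_pos hP, if_neg hQ,
        List.cons_append, List.nil_append, List.append_nil]
      rw [pvMerge_cons_left _ _ hB, ih hl']
    · simp only [List.flatMap_cons, if_neg hP, if_pos hQ,
        List.cons_append, List.nil_append]
      rw [pvMerge_cons_right _ _ hA, ih hl']
    · simp only [List.flatMap_cons, if_neg hP, if_neg hQ, List.nil_append]
      exact ih hl'

theorem pvEntry?_none {sa sb ba bc bd : Int} (h1 : sa ∉ ([ba, bc, bd] : List Int))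
    (h2 : sb ∉ ([ba, bc, bd] : List Int)) : pvEntry? sa sb ba bc bd = none := by
  simp only [List.mem_cons, List.not_mem_nil, or_false, not_or] at h1 h2
  simp [pvEntry?, h1.1, h1.2.1, h1.2.2, h2.1, h2.2.1, h2.2.2]

-- A's inner loop over all angles emits acc ++ the per-angle lists
theorem pv_A_inner (sa sb : Int) (angles : List (Int × Int × Int))
    (acc : List (Int × Int × Int × Int)) :
    angles.foldl (fun dihedrals t =>
      if (sa = t.1 ∨ sa = t.2.1 ∨ sa = t.2.2) ∧ (sb = t.1 ∨ sb = t.2.1 ∨ sb = t.2.2) then dihedrals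
      else if sa = t.1 then dihedrals ++ [(sb, t.1, t.2.1, t.2.2)]
      else if sa = t.2.1 then dihedrals ++ [(t.1, sb, t.2.1, t.2.2)]
      else if sa = t.2.2 then dihedrals ++ [(t.1, t.2.1, t.2.2, sb)]
      else if sb = t.1 then dihedrals ++ [(sa, t.1, t.2.1, t.2.2)]
      else if sb = t.2.1 then dihedrals ++ [(t.1, sa, t.2.1, t.2.2)]
      else if sb = t.2.2 then dihedrals ++ [(t.1, t.2.1, t.2.2, sa)]
      else dihedrals) acc
    = acc ++ angles.flatMap (pvEmit sa sb) := by
  rw [show (fun (dihedrals : List (Int × Int × Int × Int)) (t : Int × Int × Int) =>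
      if (sa = t.1 ∨ sa = t.2.1 ∨ sa = t.2.2) ∧ (sb = t.1 ∨ sb = t.2.1 ∨ sb = t.2.2) then dihedrals
      else if sa = t.1 then dihedrals ++ [(sb, t.1, t.2.1, t.2.2)]
      else if sa = t.2.1 then dihedrals ++ [(t.1, sb, t.2.1, t.2.2)]
      else if sa = t.2.2 then dihedrals ++ [(t.1, t.2.1, t.2.2, sb)]
      else if sb = t.1 then dihedrals ++ [(sa, t.1, t.2.1, t.2.2)]
      else if sb = t.2.1 then dihedrals ++ [(t.1, sa, t.2.1, t.2.2)]
      else if sb = t.2.2 then dihedrals ++ [(t.1, t.2.1, t.2.2, sa)]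
      else dihedrals)
      = fun dihedrals t => dihedrals ++ pvEmit sa sb t from by
    funext d t
    simp only [pvEmit, pvEntry?]
    split_ifs <;> simp]
  exact PySem.List.foldl_append_eq_flatMap _ _ _

-- B's inner loop over the merged index lists emits exactly the same lists
theorem pv_B_inner (sa sb : Int) (angles : List (Int × Int × Int))
    (acc : List (Int × Int × Int × Int)) :
    (pvMerge (pvOcc angles sa) (pvOcc angles sb)).foldl (fun dihedrals i =>
      if (sa = (PySem.List.pyGetD angles i (0, 0, 0)).1 ∨
          sa = (PySem.List.pyGetD angles i (0, 0, 0)).2.1 ∨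
          sa = (PySem.List.pyGetD angles i (0, 0, 0)).2.2) ∧
         (sb = (PySem.List.pyGetD angles i (0, 0, 0)).1 ∨
          sb = (PySem.List.pyGetD angles i (0, 0, 0)).2.1 ∨
          sb = (PySem.List.pyGetD angles i (0, 0, 0)).2.2) then dihedrals
      else match pvEntry? sa sb (PySem.List.pyGetD angles i (0, 0, 0)).1
          (PySem.List.pyGetD angles i (0, 0, 0)).2.1 (PySem.List.pyGetD angles i (0, 0, 0)).2.2 with
        | some e => dihedrals ++ [e]
        | none => dihedrals) acc
    = acc ++ angles.flatMap (pvEmit sa sb) := by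
  have hbody : (fun (dihedrals : List (Int × Int × Int × Int)) (i : Int) =>
      if (sa = (PySem.List.pyGetD angles i (0, 0, 0)).1 ∨
          sa = (PySem.List.pyGetD angles i (0, 0, 0)).2.1 ∨
          sa = (PySem.List.pyGetD angles i (0, 0, 0)).2.2) ∧
         (sb = (PySem.List.pyGetD angles i (0, 0, 0)).1 ∨
          sb = (PySem.List.pyGetD angles i (0, 0, 0)).2.1 ∨
          sb = (PySem.List.pyGetD angles i (0, 0, 0)).2.2) then dihedrals
      else match pvEntry? sa sb (PySem.List.pyGetD angles i (0, 0, 0)).1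
          (PySem.List.pyGetD angles i (0, 0, 0)).2.1 (PySem.List.pyGetD angles i (0, 0, 0)).2.2 with
        | some e => dihedrals ++ [e]
        | none => dihedrals)
      = fun dihedrals i => dihedrals ++ pvEmit sa sb (PySem.List.pyGetD angles i (0, 0, 0)) := by
    funext d i
    by_cases hb : (sa = (PySem.List.pyGetD angles i (0, 0, 0)).1 ∨
          sa = (PySem.List.pyGetD angles i (0, 0, 0)).2.1 ∨
          sa = (PySem.List.pyGetD angles i (0, 0, 0)).2.2) ∧
         (sb = (PySem.List.pyGetD angles i (0, 0, 0)).1 ∨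
          sb = (PySem.List.pyGetD angles i (0, 0, 0)).2.1 ∨
          sb = (PySem.List.pyGetD angles i (0, 0, 0)).2.2)
    · simp [pvEmit, hb]
    · simp only [pvEmit, if_neg hb]
      cases pvEntry? sa sb (PySem.List.pyGetD angles i (0, 0, 0)).1
          (PySem.List.pyGetD angles i (0, 0, 0)).2.1 (PySem.List.pyGetD angles i (0, 0, 0)).2.2 <;>
        simp
  rw [hbody, PySem.List.foldl_append_eq_flatMap]
  congr 1
  unfold pvOcc
  rw [pv_merge_flatMap _ (PySem.List.pairwise_lt_enumerate angles 0)
      (fun p => sa ∈ pvTri p.2) (fun p => sb ∈ pvTri p.2), List.flatMap_assoc]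
  conv_rhs => rw [show angles = (PySem.List.enumerate angles 0).map (·.2) from
    (PySem.List.map_snd_enumerate angles 0).symm]
  rw [List.flatMap_map]
  refine List.flatMap_congr (fun p hp => ?_)
  rcases (PySem.List.mem_enumerate_iff angles 0 p).mp hp with ⟨k, hk, rfl⟩
  have hget : PySem.List.pyGetD angles ((0 : Int) + (k : Int), angles[k]).1 (0, 0, 0) = angles[k] := by
    simp only [zero_add, PySem.List.pyGetD_natCast]
    exact List.getD_eq_getElem _ _ hk
  by_cases hA : sa ∈ pvTri angles[k] <;> by_cases hB : sb ∈ pvTri angles[k]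
  · rw [if_pos hA, if_pos hB]
    simp only [List.cons_append, List.nil_append, List.flatMap_cons, List.flatMap_nil,
      List.append_nil, hget]
    have hA' : sa = angles[k].1 ∨ sa = angles[k].2.1 ∨ sa = angles[k].2.2 := by
      simpa [pvTri] using hA
    have hB' : sb = angles[k].1 ∨ sb = angles[k].2.1 ∨ sb = angles[k].2.2 := by
      simpa [pvTri] using hB
    show pvEmit sa sb angles[k] ++ pvEmit sa sb angles[k] = pvEmit sa sb angles[k]
    rw [show pvEmit sa sb angles[k] = [] from by unfold pvEmit; rw [if_pos ⟨hA', hB'⟩]]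
    rfl
  · rw [if_pos hA, if_neg hB, List.append_nil]
    simp only [List.flatMap_cons, List.flatMap_nil, List.append_nil, hget]
  · rw [if_neg hA, if_pos hB, List.nil_append]
    simp only [List.flatMap_cons, List.flatMap_nil, List.append_nil, hget]
  · rw [if_neg hA, if_neg hB, List.append_nil, List.flatMap_nil]
    have hA' : ¬(sa = angles[k].1 ∨ sa = angles[k].2.1 ∨ sa = angles[k].2.2) := by
      simpa [pvTri] using hA
    show ([] : List (Int × Int × Int × Int)) = pvEmit sa sb angles[k]
    unfold pvEmit
    rw [if_neg (fun h => hA' h.1), pvEntry?_none hA hB]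
    rfl

-- ===== VERDICT (by name: the statement is the Claim_ definition above) =====
theorem get_stretch_angle_dihedrals_spec : Claim_equal_get_stretch_angle_dihedrals := by
  intro stretches angles _
  unfold Spec_get_stretch_angle_dihedrals get_stretch_angle_dihedrals get_stretch_angle_dihedrals_alt
  refine congrFun (congrFun (congrArg List.foldl ?_) []) stretches
  funext d s
  rw [pv_A_inner s.1 s.2 angles d]
  rw [pv_index_getD, pv_index_getD]
  rw [pv_B_inner s.1 s.2 angles d]
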